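-- pv_equiv track=rewrite | github.com/RedUn1verse/Reddit-Chat-Bot | src/madlibs.py | capitalize_sentence_grid
-- ===== SOURCE A (Python) =====
-- def capitalize_sentences (text):
--     """ (string) -> string
--     Takes a string containing sentences and returns a string containing those sentence with proper capitalization.
--
--     >>> capitalize_sentences ("hello. nice to meet you!")
--     Hello. Nice to meet you!
--     >>> capitalize_sentences ("tEST")
--     TEST
--     >>> capitalize_sentences ("...hello. how are you?")
--     "...hello. How are you?"
--     """
--     textArray = []
--
--     for x in text:
--         textArray.append(x)
--
--     # Prevents error that occurs when textArray passes this point completely empty.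
--
--     textArray.append("")
--
--     for x in range (len(textArray)):
--         if x == 0:
--             textArray[x] = textArray[x].upper()
--
--         # Only capitalizes the letter if punctuation is found AND there is a space after the punctuation!
--
--         elif len(textArray) > x + 2 and (textArray[x] == "." or textArray[x] == "!" or textArray[x] == "?") and textArray[x + 1] == " ":
--             textArray [x + 2] = textArray[x + 2].upper()
--     return ("".join(textArray))
--
-- def capitalize_sentence_grid (gridList):
--     """ (list<string>) -> list<string>
--     Takes a list of strings and returns a list of strings with the proper capitalization if that list were to be converted into one single text.
--
--     >>> capitalize_sentence_grid (["hello", "how", "are"], ["you?", "good."])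
--     [["Hello", "how", "are"], ["you?", "Good."]]
--     >>> capitalize_sentence_grid (["hello.", "how", "are"], ["you", "today?."], ["good!"])
--     [["Hello.", "How", "are"], ["you", "today?"], ["Good!"]]
--     >>> capitalize_sentence_grid (["test"], ["test"], ["test.", "test?", "test!"])
--     [["Test"], ["test"], ["test.", "Test?", "Test!"]]
--     """
--     holderList = []
--     holderGridList = []
--     holderString = ""
--     counter = 0
--
--     # Builds a single String out of the list, capitalizes, then reverts to list.
--
--     for x in gridList:
--         holderString += (" ".join(x)) + " "
--     holderString = capitalize_sentences (holderString.strip(" "))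
--
--     holderList = holderString.split(" ")
--     holderGridList = []
--
--     for x in gridList:
--         holderGridList.append(holderList[counter : counter + len(x)])
--         counter += len(x)
--
--     return (holderGridList)
-- ===== SOURCE B (Python) =====
-- def capitalize_sentence_grid(gridList):
--     # Same flatten: join each row with spaces plus a trailing space, then strip(" ").
--     holderString = ""
--     for x in gridList:
--         holderString += (" ".join(x)) + " "
--     tokens = holderString.strip(" ").split(" ")
--     # Token-level scan: capitalize the first char of a token that starts a sentence.
--     cap_next = True
--     for i, tok in enumerate(tokens):
--         if tok:
--             if cap_next:
--                 tokens[i] = tok[0].upper() + tok[1:]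
--             cap_next = tok[-1] in ".!?"
--         else:
--             cap_next = False
--     # Regroup by the original row lengths.
--     out = []
--     counter = 0
--     for x in gridList:
--         out.append(tokens[counter: counter + len(x)])
--         counter += len(x)
--     return out
-- ===== Notes on version B (the rewrite author's own statement) =====
-- stated objective: faster
-- what changed: A rebuilds the flattened text character by character into a list and runs an index loop with punctuation/space lookahead over it; B splits the flattened text once into words and makes a single token-level pass with a capitalize-next flag, then regroups, avoiding the per-character list construction and per-index loop.
-- intended difference: When the flattened, stripped text begins with a lone '.', '!' or '?' followed by a space and a lowercase letter (and the grid holds at least two words), A's x==0 branch swallows that punctuation so A leaves the following word uncapitalized, while B capitalizes it, which is the intended behaviour of sentence capitalization. — e.g. on capitalize_sentence_grid([[".", "a"]]): A returns [[".", "a"]], B returns [[".", "A"]]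
import Mathlib
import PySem

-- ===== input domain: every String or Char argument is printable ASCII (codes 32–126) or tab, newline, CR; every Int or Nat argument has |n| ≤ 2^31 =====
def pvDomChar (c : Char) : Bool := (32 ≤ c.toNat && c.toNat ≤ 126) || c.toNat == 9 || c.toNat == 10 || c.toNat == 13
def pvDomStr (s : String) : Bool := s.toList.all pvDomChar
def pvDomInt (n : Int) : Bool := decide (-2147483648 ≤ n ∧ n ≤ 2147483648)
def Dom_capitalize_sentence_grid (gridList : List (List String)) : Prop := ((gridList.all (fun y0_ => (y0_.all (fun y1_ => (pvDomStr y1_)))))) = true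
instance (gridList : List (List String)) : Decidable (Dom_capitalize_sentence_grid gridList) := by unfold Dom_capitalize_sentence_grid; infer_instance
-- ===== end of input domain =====

-- B replaces A's char-by-char index loop (with punctuation/space lookahead) by a single
-- token-level pass with a capitalize-next flag over the split word list; equal outside D_.
-- Strings are ported through their character lists (PySem.Chars), exact on the domain.

-- ===== PORT A =====
-- capitalize_sentences: textArray is Python's list of 1-char strings (here: List (List Char)),
-- with the appended "" = [].  One loop iteration; indices from range(len(arr)) are in range,
-- so pyGetD's default is never read and (x+2).toNat is exact (0 ≤ x, x+2 < len by the guard).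
def pvCapSentStep (arr : List (List Char)) (x : Int) : List (List Char) :=
  if x = 0 then
    arr.set 0 (PySem.Chars.upper (PySem.List.pyGetD arr 0 []))
  else if ((arr.length : Int) > x + 2) ∧
      (PySem.List.pyGetD arr x [] = ['.'] ∨ PySem.List.pyGetD arr x [] = ['!'] ∨
        PySem.List.pyGetD arr x [] = ['?']) ∧ PySem.List.pyGetD arr (x + 1) [] = [' '] then
    arr.set (x + 2).toNat (PySem.Chars.upper (PySem.List.pyGetD arr (x + 2) []))
  else arr

def pvCapSentences (text : List Char) : List Char :=
  let ta : List (List Char) := text.foldl (fun a c => a ++ [[c]]) []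
  let ta := ta ++ [[]]
  let ta := (PySem.List.pyRange 0 (ta.length : Int) 1).foldl pvCapSentStep ta
  PySem.Chars.join [] ta

def capitalize_sentence_grid (gridList : List (List String)) : List (List String) :=
  let holderString : List Char :=
    gridList.foldl (fun h x => h ++ PySem.Chars.join [' '] (x.map String.toList) ++ [' ']) []
  let holderString := pvCapSentences (PySem.Chars.stripChars holderString [' '])
  let holderList : List String := (PySem.Chars.splitOn holderString [' ']).map String.ofList
  (gridList.foldl
    (fun (st : List (List String) × Int) x =>
      (st.1 ++ [PySem.List.slice holderList (some st.2) (some (st.2 + (x.length : Int)))],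
        st.2 + (x.length : Int)))
    ([], 0)).1

-- ===== PORT B =====
-- tok[0].upper() + tok[1:]
def pvUpperFirst (t : List Char) : List Char :=
  match t with
  | [] => []
  | c :: cs => PySem.Chars.upperChar c :: cs

-- tok[-1] in ".!?"  (only reached for nonempty tok)
def pvEndsPunct (t : List Char) : Bool :=
  match t.getLast? with
  | some c => c == '.' || c == '!' || c == '?'
  | none => false

-- the capitalize-next token scan of Source B
def pvScanTok : Bool → List (List Char) → List (List Char)
  | _, [] => []
  | capNext, t :: ts =>
      if t ≠ [] then (if capNext then pvUpperFirst t else t) :: pvScanTok (pvEndsPunct t) ts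
      else t :: pvScanTok false ts

def capitalize_sentence_grid_alt (gridList : List (List String)) : List (List String) :=
  let holderString : List Char :=
    gridList.foldl (fun h x => h ++ PySem.Chars.join [' '] (x.map String.toList) ++ [' ']) []
  let toks := pvScanTok true
    (PySem.Chars.splitOn (PySem.Chars.stripChars holderString [' ']) [' '])
  let holderList : List String := toks.map String.ofList
  (gridList.foldl
    (fun (st : List (List String) × Int) x =>
      (st.1 ++ [PySem.List.slice holderList (some st.2) (some (st.2 + (x.length : Int)))],
        st.2 + (x.length : Int)))
    ([], 0)).1

-- ===== PRECONDITION & SPEC =====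
-- The characters the grid's text starts with (rows flattened, word/row breaks as spaces,
-- leading spaces dropped) — D_ inspects the input only, independently of the ports' code.
def pvRowChars (row : List String) : List Char :=
  if row = [] then [' '] else row.flatMap (fun w => w.toList ++ [' '])

def pvLeadChars (gridList : List (List String)) : List Char :=
  (gridList.flatMap pvRowChars).dropWhile (fun c => c == ' ')

-- On grids whose flattened stripped text starts with a lone '.', '!' or '?' followed by a space
-- and an uppercasable letter (and holding at least two words), A's x==0 branch swallows the
-- punctuation, so A leaves the following word uncapitalized while B capitalizes it — B's value
-- is the intended sentence capitalization.
def D_capitalize_sentence_grid (gridList : List (List String)) : Prop :=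
  (pvLeadChars gridList).getD 1 'x' = ' ' ∧
  ((pvLeadChars gridList).getD 0 'x' = '.' ∨ (pvLeadChars gridList).getD 0 'x' = '!' ∨
    (pvLeadChars gridList).getD 0 'x' = '?') ∧
  PySem.Chars.upperChar ((pvLeadChars gridList).getD 2 ' ') ≠ (pvLeadChars gridList).getD 2 ' ' ∧
  2 ≤ (gridList.map List.length).sum

instance (gridList : List (List String)) : Decidable (D_capitalize_sentence_grid gridList) := by
  unfold D_capitalize_sentence_grid; infer_instance

def Spec_capitalize_sentence_grid (gridList : List (List String)) (out : List (List String)) : Prop :=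
  ¬ D_capitalize_sentence_grid gridList → out = capitalize_sentence_grid_alt gridList

instance (gridList : List (List String)) (out : List (List String)) :
    Decidable (Spec_capitalize_sentence_grid gridList out) := by
  unfold Spec_capitalize_sentence_grid; infer_instance

def pvDiffWitness_capitalize_sentence_grid : List (List String) := [[".", "a"]]

def pvDiffWitnessOut_capitalize_sentence_grid : (List (List String)) × (List (List String)) :=
  ([[".", "a"]], [[".", "A"]])

-- ===== CLAIM (what is proved, stated in full; the proofs are below) =====
def Claim_unchanged_capitalize_sentence_grid : Prop :=
  ∀ (gridList : List (List String)), Dom_capitalize_sentence_grid gridList →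
    Spec_capitalize_sentence_grid gridList (capitalize_sentence_grid gridList)

def Claim_changed_capitalize_sentence_grid : Prop :=
  Dom_capitalize_sentence_grid (pvDiffWitness_capitalize_sentence_grid) ∧
  D_capitalize_sentence_grid (pvDiffWitness_capitalize_sentence_grid) ∧
  capitalize_sentence_grid (pvDiffWitness_capitalize_sentence_grid) =
    pvDiffWitnessOut_capitalize_sentence_grid.1 ∧
  capitalize_sentence_grid_alt (pvDiffWitness_capitalize_sentence_grid) =
    pvDiffWitnessOut_capitalize_sentence_grid.2 ∧
  pvDiffWitnessOut_capitalize_sentence_grid.1 ≠ pvDiffWitnessOut_capitalize_sentence_grid.2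

def Claim_exact_capitalize_sentence_grid : Prop :=
  ∀ (gridList : List (List String)), Dom_capitalize_sentence_grid gridList →
    D_capitalize_sentence_grid gridList →
    capitalize_sentence_grid gridList ≠ capitalize_sentence_grid_alt gridList

-- ===== LEMMAS AND PROOFS =====

-- ---------- proof-only helpers ----------

def pvPunctC (c : Char) : Bool := c == '.' || c == '!' || c == '?'

-- the char-level effect of A's loop from position 3 on, window = previous two chars
def pvGoA (p q : Char) : List Char → List Char
  | [] => []
  | c :: t => (if pvPunctC p && (q == ' ') then PySem.Chars.upperChar c else c) :: pvGoA q c t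

def pvCapC2 (d : Char) : List Char → List Char
  | [] => []
  | e :: t => e :: pvGoA d e t

def pvCapC1 : List Char → List Char
  | [] => []
  | d :: t => d :: pvCapC2 d t

-- closed recursive form of capitalize_sentences
def pvCapC : List Char → List Char
  | [] => []
  | c :: t => PySem.Chars.upperChar c :: pvCapC1 t

-- reference form of s.split(" ")
def pvSplit (cur : List Char) : List Char → List (List Char)
  | [] => [cur]
  | c :: r => if c = ' ' then cur :: pvSplit [] r else pvSplit (cur ++ [c]) r

-- the tests A makes on a (possibly already uppercased) cell agree with the original char
def pvRepr (v : List Char) (c : Char) : Prop :=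
  (v = ['.'] ↔ c = '.') ∧ (v = ['!'] ↔ c = '!') ∧ (v = ['?'] ↔ c = '?') ∧ (v = [' '] ↔ c = ' ')

-- ---------- upperChar facts ----------

theorem pvUpper_eq_iff (c x : Char) (hx : x.toNat < 65) :
    (PySem.Chars.upperChar c = x ↔ c = x) := by
  unfold PySem.Chars.upperChar
  by_cases h : PySem.Chars.islower c = true
  · rw [if_pos h]
    simp only [PySem.Chars.islower, Bool.and_eq_true, decide_eq_true_eq, Char.le_def] at h
    have h97 : 97 ≤ c.toNat := by exact_mod_cast h.1
    have h122 : c.toNat ≤ 122 := by exact_mod_cast h.2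
    constructor
    · intro he
      exfalso
      have hts : (Char.ofNat (c.toNat - 32)).toNat = x.toNat := by rw [he]
      rw [Char.toNat_ofNat] at hts
      have hv : (c.toNat - 32).isValidChar := by unfold Nat.isValidChar; left; omega
      rw [if_pos hv] at hts
      omega
    · intro he; exfalso; rw [he] at h97; omega
  · rw [if_neg h]

theorem pvRepr_self (c : Char) : pvRepr [c] c := by
  refine ⟨?_, ?_, ?_, ?_⟩ <;> constructor <;> intro h <;> simp_all

theorem pvRepr_upper (c : Char) : pvRepr [PySem.Chars.upperChar c] c := by
  refine ⟨?_, ?_, ?_, ?_⟩ <;> constructor <;> intro h <;>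
    simp only [List.cons.injEq, and_true] at * <;>
    first
      | (exact (pvUpper_eq_iff c _ (by decide)).mp h)
      | (exact (pvUpper_eq_iff c _ (by decide)).mpr h)

theorem pvUpper_space : PySem.Chars.upperChar ' ' = ' ' := by decide

-- ---------- split(" ") characterization ----------

theorem pvGo_eq : ∀ (fuel : Nat) (l cur : List Char) (acc : List (List Char)),
    l.length < fuel →
    PySem.Chars.splitOn.go [' '] fuel l cur acc = acc.reverse ++ pvSplit cur.reverse l := by
  intro fuel
  induction fuel with
  | zero => intro l cur acc h; omega
  | succ n ih =>
    intro l cur acc h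
    match l with
    | [] => simp [PySem.Chars.splitOn.go, pvSplit]
    | c :: rest =>
      rw [PySem.Chars.splitOn.go]
      by_cases hc : c = ' '
      · subst hc
        simp only [List.isPrefixOf, BEq.rfl, Bool.and_eq_true]
        rw [ih]
        · simp [pvSplit]
        · simpa using Nat.lt_of_succ_lt_succ h
      · have hp : [' '].isPrefixOf (c :: rest) = false := by
          simp [List.isPrefixOf]; intro hcontra; exact hc (by simpa using hcontra.symm)
        rw [hp]
        simp only [Bool.false_eq_true, if_false]
        rw [ih]
        · simp [pvSplit, hc]
        · simpa using Nat.lt_of_succ_lt_succ h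

theorem pvSplitOn_eq (s : List Char) : PySem.Chars.splitOn s [' '] = pvSplit [] s := by
  rw [PySem.Chars.splitOn, pvGo_eq] <;> simp

theorem pvSplit_ne_nil : ∀ (l cur : List Char), pvSplit cur l ≠ [] := by
  intro l
  induction l with
  | nil => intro cur; simp [pvSplit]
  | cons c r ih => intro cur; by_cases hc : c = ' ' <;> simp [pvSplit, hc, ih]

theorem pvJoin_cons (sep t : List Char) (ts : List (List Char)) (h : ts ≠ []) :
    PySem.Chars.join sep (t :: ts) = t ++ sep ++ PySem.Chars.join sep ts := by
  match ts with
  | [] => exact absurd rfl h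
  | u :: ts' => exact PySem.Chars.join_cons_cons sep t u ts'

theorem pvJoinNil : ∀ (l : List (List Char)), PySem.Chars.join [] l = l.flatten := by
  intro l
  induction l with
  | nil => simp [PySem.Chars.join_nil]
  | cons t ts ih =>
    match ts with
    | [] => simp [PySem.Chars.join_singleton]
    | u :: ts' => rw [PySem.Chars.join_cons_cons]; simp_all

theorem pvJoin_pvSplit : ∀ (l cur : List Char),
    PySem.Chars.join [' '] (pvSplit cur l) = cur ++ l := by
  intro l
  induction l with
  | nil => intro cur; simp [pvSplit, PySem.Chars.join_singleton]
  | cons c r ih =>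
    intro cur
    by_cases hc : c = ' '
    · subst hc
      rw [pvSplit]
      rw [if_pos rfl, pvJoin_cons _ _ _ (pvSplit_ne_nil r []), ih]
      simp
    · rw [pvSplit]
      simp only [if_neg hc]
      rw [ih]
      simp

theorem pvSplit_space_free : ∀ (l cur : List Char), ' ' ∉ cur →
    ∀ t ∈ pvSplit cur l, ' ' ∉ t := by
  intro l
  induction l with
  | nil => intro cur hcur t ht; simp [pvSplit] at ht; subst ht; exact hcur
  | cons c r ih =>
    intro cur hcur t ht
    by_cases hc : c = ' '
    · subst hc
      simp [pvSplit] at ht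
      rcases ht with h | h
      · subst h; exact hcur
      · exact ih [] (by simp) t h
    · simp [pvSplit, hc] at ht
      exact ih (cur ++ [c]) (by simp [hcur, Ne.symm hc]) t ht

theorem pvSplit_no_space_append : ∀ (l : List Char), ' ' ∉ l → ∀ cur r,
    pvSplit cur (l ++ ' ' :: r) = (cur ++ l) :: pvSplit [] r := by
  intro l
  induction l with
  | nil => intro _ cur r; simp [pvSplit]
  | cons c l' ih =>
    intro h cur r
    have hc : c ≠ ' ' := fun he => h (he ▸ List.mem_cons_self)
    simp only [List.cons_append, pvSplit, if_neg hc]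
    rw [ih (fun hm => h (List.mem_cons_of_mem _ hm)) (cur ++ [c]) r]
    simp

theorem pvSplit_no_space : ∀ (l : List Char), ' ' ∉ l → ∀ cur, pvSplit cur l = [cur ++ l] := by
  intro l
  induction l with
  | nil => intro _ cur; simp [pvSplit]
  | cons c l' ih =>
    intro h cur
    have hc : c ≠ ' ' := fun he => h (he ▸ List.mem_cons_self)
    simp only [pvSplit, if_neg hc]
    rw [ih (fun hm => h (List.mem_cons_of_mem _ hm)) (cur ++ [c])]
    simp

theorem pvSplit_join : ∀ (ts : List (List Char)), ts ≠ [] → (∀ t ∈ ts, ' ' ∉ t) →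
    pvSplit [] (PySem.Chars.join [' '] ts) = ts := by
  intro ts
  induction ts with
  | nil => intro h; exact absurd rfl h
  | cons t ts' ih =>
    intro _ hsf
    match ts' with
    | [] =>
      rw [PySem.Chars.join_singleton]
      rw [pvSplit_no_space t (hsf t (by simp)) []]
      simp
    | u :: ts'' =>
      rw [PySem.Chars.join_cons_cons]
      rw [List.append_assoc, List.singleton_append]
      rw [pvSplit_no_space_append t (hsf t (by simp)) []]
      rw [ih (by simp) (fun x hx => hsf x (List.mem_cons_of_mem _ hx))]
      simp

-- ---------- token scan facts ----------

theorem pvScan_ne_nil (f : Bool) (t : List Char) (ts : List (List Char)) :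
    pvScanTok f (t :: ts) ≠ [] := by
  rw [pvScanTok]; split <;> simp

theorem pvUpperFirst_space_free {t : List Char} (h : ' ' ∉ t) : ' ' ∉ pvUpperFirst t := by
  match t with
  | [] => simpa [pvUpperFirst] using h
  | c :: cs =>
    simp only [pvUpperFirst, List.mem_cons, not_or] at *
    exact ⟨fun he => h.1 ((pvUpper_eq_iff c ' ' (by decide)).mp he.symm).symm, h.2⟩

theorem pvScan_space_free : ∀ (ts : List (List Char)) (f : Bool), (∀ t ∈ ts, ' ' ∉ t) →
    ∀ t ∈ pvScanTok f ts, ' ' ∉ t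
  | [], _, _ => by simp [pvScanTok]
  | u :: ts', f, h => by
    rw [pvScanTok]
    by_cases hu : u = []
    · rw [if_neg (by simpa using hu)]
      intro t ht
      rcases List.mem_cons.mp ht with h1 | h1
      · subst h1; subst hu; simp
      · exact pvScan_space_free ts' false (fun x hx => h x (List.mem_cons_of_mem _ hx)) t h1
    · rw [if_pos (by simpa using hu)]
      intro t ht
      rcases List.mem_cons.mp ht with h1 | h1
      · subst h1
        split
        · exact pvUpperFirst_space_free (h u (by simp))
        · exact h u (by simp)
      · exact pvScan_space_free ts' (pvEndsPunct u) (fun x hx => h x (List.mem_cons_of_mem _ hx)) t h1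

theorem pvEndsPunct_cons (c : Char) (cs : List Char) :
    pvEndsPunct (c :: cs) = pvPunctC (cs.getLastD c) := by
  rw [pvEndsPunct, List.getLast?_cons, List.getLastD_eq_getLast?]
  rfl

-- ---------- char scan vs token scan ----------

theorem pvGoA_no_space : ∀ (cs : List Char) (p q : Char), q ≠ ' ' → ' ' ∉ cs →
    pvGoA p q cs = cs := by
  intro cs
  induction cs with
  | nil => intro p q _ _; rfl
  | cons c cs' ih =>
    intro p q hq hsf
    rw [pvGoA]
    have : (q == ' ') = false := by simpa using hq
    rw [this]
    simp only [Bool.and_false, Bool.false_eq_true, if_false]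
    rw [ih q c (fun he => hsf (he ▸ List.mem_cons_self)) (fun hm => hsf (List.mem_cons_of_mem _ hm))]

theorem pvGoA_token : ∀ (cs : List Char) (r : List Char) (p q : Char), q ≠ ' ' → ' ' ∉ cs →
    pvGoA p q (cs ++ ' ' :: r) = cs ++ ' ' :: pvGoA (cs.getLastD q) ' ' r := by
  intro cs
  induction cs with
  | nil =>
    intro r p q hq _
    rw [List.nil_append, pvGoA]
    have : (q == ' ') = false := by simpa using hq
    rw [this]
    simp [List.getLastD]
  | cons c cs' ih =>
    intro r p q hq hsf
    rw [List.cons_append, pvGoA]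
    have : (q == ' ') = false := by simpa using hq
    rw [this]
    simp only [Bool.and_false, Bool.false_eq_true, if_false, List.getLastD_cons]
    rw [ih r q c (fun he => hsf (he ▸ List.mem_cons_self)) (fun hm => hsf (List.mem_cons_of_mem _ hm))]
    simp

theorem pvGoA_boundary : ∀ (ts : List (List Char)) (p : Char), (∀ t ∈ ts, ' ' ∉ t) →
    pvGoA p ' ' (PySem.Chars.join [' '] ts) =
      PySem.Chars.join [' '] (pvScanTok (pvPunctC p) ts) := by
  intro ts
  induction ts with
  | nil => intro p _; simp [PySem.Chars.join_nil, pvScanTok, pvGoA]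
  | cons t ts' ih =>
    intro p hsf
    have hsf' : ∀ x ∈ ts', ' ' ∉ x := fun x hx => hsf x (List.mem_cons_of_mem _ hx)
    rw [pvScanTok]
    match t, ts' with
    | [], [] =>
      simp [PySem.Chars.join_singleton, pvScanTok, pvGoA]
    | [], u :: ts'' =>
      rw [if_neg (by simp)]
      rw [pvJoin_cons _ _ _ (pvScan_ne_nil _ _ _), List.nil_append, List.singleton_append]
      rw [PySem.Chars.join_cons_cons, List.nil_append, List.singleton_append, pvGoA]
      have hfalse : pvPunctC ' ' = false := by decide
      rw [← hfalse, ih ' ' hsf']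
      congr 1
      split <;> simp [pvUpper_space]
    | c :: cs, [] =>
      have hc : c ≠ ' ' := fun he => hsf (c :: cs) (by simp) (he ▸ List.mem_cons_self)
      have hcs : ' ' ∉ cs := fun hm => hsf (c :: cs) (by simp) (List.mem_cons_of_mem _ hm)
      rw [if_pos (by simp)]
      simp only [pvScanTok]
      rw [PySem.Chars.join_singleton, PySem.Chars.join_singleton, pvGoA]
      rw [pvGoA_no_space cs ' ' c hc hcs]
      split <;> simp_all [pvUpperFirst]
    | c :: cs, u :: ts'' =>
      have hc : c ≠ ' ' := fun he => hsf (c :: cs) (by simp) (he ▸ List.mem_cons_self)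
      have hcs : ' ' ∉ cs := fun hm => hsf (c :: cs) (by simp) (List.mem_cons_of_mem _ hm)
      rw [if_pos (by simp)]
      rw [pvJoin_cons _ _ _ (pvScan_ne_nil _ _ _)]
      rw [PySem.Chars.join_cons_cons, List.append_assoc, List.singleton_append, List.cons_append,
        pvGoA]
      rw [pvGoA_token cs _ ' ' c hc hcs]
      rw [ih (cs.getLastD c) hsf']
      rw [pvEndsPunct_cons]
      have htr : (' ' == ' ') = true := by decide
      rw [htr, Bool.and_true]
      split <;> simp [pvUpperFirst]

-- capC2 at an initial ' ' window behaves like the scan with flag false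
theorem pvCapC2_space : ∀ (ts : List (List Char)), (∀ t ∈ ts, ' ' ∉ t) →
    pvCapC2 ' ' (PySem.Chars.join [' '] ts) =
      PySem.Chars.join [' '] (pvScanTok false ts) := by
  intro ts hsf
  match ts with
  | [] => simp [PySem.Chars.join_nil, pvScanTok, pvCapC2]
  | t :: ts' =>
    have hsf' : ∀ x ∈ ts', ' ' ∉ x := fun x hx => hsf x (List.mem_cons_of_mem _ hx)
    rw [pvScanTok]
    match t, ts' with
    | [], [] => simp [PySem.Chars.join_singleton, pvScanTok, pvCapC2]
    | [], u :: ts'' =>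
      rw [if_neg (by simp)]
      rw [pvJoin_cons _ _ _ (pvScan_ne_nil _ _ _), List.nil_append, List.singleton_append]
      rw [PySem.Chars.join_cons_cons, List.nil_append, List.singleton_append, pvCapC2]
      have hfalse : pvPunctC ' ' = false := by decide
      rw [← hfalse, pvGoA_boundary _ ' ' hsf']
    | c :: cs, [] =>
      have hc : c ≠ ' ' := fun he => hsf (c :: cs) (by simp) (he ▸ List.mem_cons_self)
      have hcs : ' ' ∉ cs := fun hm => hsf (c :: cs) (by simp) (List.mem_cons_of_mem _ hm)
      rw [if_pos (by simp)]
      simp only [pvScanTok]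
      rw [PySem.Chars.join_singleton, PySem.Chars.join_singleton, pvCapC2]
      rw [pvGoA_no_space cs ' ' c hc hcs]
      simp
    | c :: cs, u :: ts'' =>
      have hc : c ≠ ' ' := fun he => hsf (c :: cs) (by simp) (he ▸ List.mem_cons_self)
      have hcs : ' ' ∉ cs := fun hm => hsf (c :: cs) (by simp) (List.mem_cons_of_mem _ hm)
      rw [if_pos (by simp)]
      rw [pvJoin_cons _ _ _ (pvScan_ne_nil _ _ _)]
      rw [PySem.Chars.join_cons_cons, List.append_assoc, List.singleton_append, List.cons_append,
        pvCapC2]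
      rw [pvGoA_token cs _ ' ' c hc hcs]
      rw [pvGoA_boundary _ _ hsf']
      rw [pvEndsPunct_cons]
      simp

-- the scan flag is irrelevant when the first token cannot change
theorem pvScan_flag_irrel : ∀ (ts : List (List Char)) (f g : Bool),
    (∀ e es, ts.head? = some (e :: es) → PySem.Chars.upperChar e = e) →
    pvScanTok f ts = pvScanTok g ts := by
  intro ts f g hh
  match ts with
  | [] => rfl
  | [] :: ts' => simp [pvScanTok]
  | (e :: es) :: ts' =>
    have he : PySem.Chars.upperChar e = e := hh e es rfl
    rw [pvScanTok, pvScanTok]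
    simp only [ne_eq, reduceCtorEq, not_false_eq_true, if_true]
    congr 1
    split <;> split <;> simp [pvUpperFirst, he]

theorem pvCapC1_join : ∀ (ts : List (List Char)), (∀ t ∈ ts, ' ' ∉ t) →
    pvCapC1 (PySem.Chars.join [' '] ts) =
      PySem.Chars.join [' '] (pvScanTok false ts) := by
  intro ts hsf
  match ts with
  | [] => simp [PySem.Chars.join_nil, pvScanTok, pvCapC1]
  | t :: ts' =>
    have hsf' : ∀ x ∈ ts', ' ' ∉ x := fun x hx => hsf x (List.mem_cons_of_mem _ hx)
    rw [pvScanTok]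
    match t, ts' with
    | [], [] => simp [PySem.Chars.join_singleton, pvScanTok, pvCapC1]
    | [], u :: ts'' =>
      rw [if_neg (by simp)]
      rw [pvJoin_cons _ _ _ (pvScan_ne_nil _ _ _), List.nil_append, List.singleton_append]
      rw [PySem.Chars.join_cons_cons, List.nil_append, List.singleton_append, pvCapC1]
      rw [pvCapC2_space _ hsf']
    | c :: cs, [] =>
      have hcs : ' ' ∉ cs := fun hm => hsf (c :: cs) (by simp) (List.mem_cons_of_mem _ hm)
      rw [if_pos (by simp)]
      simp only [pvScanTok]
      rw [PySem.Chars.join_singleton, PySem.Chars.join_singleton, pvCapC1]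
      simp only [Bool.false_eq_true, if_false]
      match cs, hcs with
      | [], _ => simp [pvCapC2]
      | f :: cs', hcs =>
        rw [pvCapC2]
        rw [pvGoA_no_space cs' c f (fun he => hcs (he ▸ List.mem_cons_self))
          (fun hm => hcs (List.mem_cons_of_mem _ hm))]
    | c :: cs, u :: ts'' =>
      have hcs : ' ' ∉ cs := fun hm => hsf (c :: cs) (by simp) (List.mem_cons_of_mem _ hm)
      rw [if_pos (by simp)]
      simp only [Bool.false_eq_true, if_false]
      rw [pvJoin_cons _ _ _ (pvScan_ne_nil _ _ _)]
      rw [PySem.Chars.join_cons_cons, List.append_assoc, List.singleton_append, List.cons_append,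
        pvCapC1]
      rw [pvEndsPunct_cons]
      match cs, hcs with
      | [], _ =>
        rw [List.nil_append, pvCapC2]
        rw [pvGoA_boundary _ _ hsf']
        simp [List.getLastD]
      | f :: cs', hcs =>
        rw [List.cons_append, pvCapC2]
        rw [pvGoA_token cs' _ c f (fun he => hcs (he ▸ List.mem_cons_self))
          (fun hm => hcs (List.mem_cons_of_mem _ hm))]
        rw [pvGoA_boundary _ _ hsf']
        simp [← List.getLastD_eq_getLast?, List.getLastD_cons]

-- top level: A's char transform vs B's token scan on a join of space-free tokens;
-- the hypothesis excludes exactly A's x==0 quirk (lone leading punctuation token)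
theorem pvCapC_join : ∀ (ts : List (List Char)), (∀ t ∈ ts, ' ' ∉ t) →
    (∀ c0 t1 rest, ts = [c0] :: t1 :: rest → pvPunctC c0 = true →
      (∀ e es, t1 = e :: es → PySem.Chars.upperChar e = e)) →
    pvCapC (PySem.Chars.join [' '] ts) =
      PySem.Chars.join [' '] (pvScanTok true ts) := by
  intro ts hsf hquirk
  match ts with
  | [] => simp [PySem.Chars.join_nil, pvScanTok, pvCapC]
  | t :: ts' =>
    have hsf' : ∀ x ∈ ts', ' ' ∉ x := fun x hx => hsf x (List.mem_cons_of_mem _ hx)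
    rw [pvScanTok]
    match t, ts' with
    | [], [] => simp [PySem.Chars.join_singleton, pvScanTok, pvCapC]
    | [], u :: ts'' =>
      rw [if_neg (by simp)]
      rw [pvJoin_cons _ _ _ (pvScan_ne_nil _ _ _), List.nil_append, List.singleton_append]
      rw [PySem.Chars.join_cons_cons, List.nil_append, List.singleton_append, pvCapC]
      rw [pvCapC1_join _ hsf', pvUpper_space]
    | c :: cs, [] =>
      have hcs : ' ' ∉ cs := fun hm => hsf (c :: cs) (by simp) (List.mem_cons_of_mem _ hm)
      rw [if_pos (by simp)]
      simp only [pvScanTok]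
      rw [PySem.Chars.join_singleton, PySem.Chars.join_singleton, pvCapC]
      simp only [if_pos rfl, pvUpperFirst]
      match cs, hcs with
      | [], _ => simp [pvCapC1]
      | d :: cs', hcs =>
        rw [pvCapC1]
        have hcs' : ' ' ∉ cs' := fun hm => hcs (List.mem_cons_of_mem _ hm)
        match cs', hcs' with
        | [], _ => simp [pvCapC2]
        | e :: cs'', hcs' =>
          rw [pvCapC2]
          rw [pvGoA_no_space cs'' d e (fun he => hcs' (he ▸ List.mem_cons_self))
            (fun hm => hcs' (List.mem_cons_of_mem _ hm))]
          simp
    | c :: cs, u :: ts'' =>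
      have hcs : ' ' ∉ cs := fun hm => hsf (c :: cs) (by simp) (List.mem_cons_of_mem _ hm)
      rw [if_pos (by simp), if_pos rfl]
      rw [pvJoin_cons _ _ _ (pvScan_ne_nil _ _ _), pvEndsPunct_cons]
      rw [PySem.Chars.join_cons_cons, List.append_assoc, List.singleton_append, List.cons_append,
        pvCapC]
      match cs, hcs with
      | [], _ =>
        rw [List.nil_append, pvCapC1]
        simp only [List.getLastD, pvUpperFirst, List.nil_append]
        by_cases hp : pvPunctC c = true
        · have hirr : pvScanTok true (u :: ts'') = pvScanTok false (u :: ts'') := by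
            apply pvScan_flag_irrel
            intro e es he
            exact hquirk c u ts'' rfl hp e es (by simpa using he)
          rw [hp, pvCapC2_space _ hsf', hirr]
          simp
        · have hp' : pvPunctC c = false := by simpa using hp
          rw [hp', pvCapC2_space _ hsf']
          simp
      | d :: cs', hcs =>
        rw [List.cons_append, pvCapC1]
        have hcs' : ' ' ∉ cs' := fun hm => hcs (List.mem_cons_of_mem _ hm)
        match cs', hcs' with
        | [], _ =>
          rw [List.nil_append, pvCapC2]
          rw [pvGoA_boundary _ _ hsf']
          simp [pvUpperFirst, List.getLastD]
        | e :: cs'', hcs' =>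
          rw [List.cons_append, pvCapC2]
          rw [pvGoA_token cs'' _ d e (fun he => hcs' (he ▸ List.mem_cons_self))
            (fun hm => hcs' (List.mem_cons_of_mem _ hm))]
          rw [pvGoA_boundary _ _ hsf']
          simp [pvUpperFirst, ← List.getLastD_eq_getLast?, List.getLastD_cons]

-- ---------- A's index loop characterized ----------

theorem pvGetD_mid : ∀ (pre : List (List Char)) (v : List Char) (rest : List (List Char)),
    PySem.List.pyGetD (pre ++ v :: rest) (pre.length : Int) [] = v := by
  intro pre
  induction pre with
  | nil => intro v rest; simp [PySem.List.pyGetD_natCast]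
  | cons a pre' ih =>
    intro v rest
    have : ((a :: pre').length : Int) = ((pre'.length + 1 : Nat) : Int) := by simp
    rw [this, PySem.List.pyGetD_natCast]
    have := ih v rest
    rw [PySem.List.pyGetD_natCast] at this
    simpa using this

theorem pvSet_mid : ∀ (pre : List (List Char)) (v w : List Char) (rest : List (List Char)),
    (pre ++ v :: rest).set pre.length w = pre ++ w :: rest := by
  intro pre
  induction pre with
  | nil => intro v w rest; simp
  | cons a pre' ih => intro v w rest; simp [ih]

theorem pvLoopW : ∀ (t : List Char) (pre : List (List Char)) (pv qv : List Char) (p q : Char),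
    1 ≤ pre.length → pvRepr pv p → pvRepr qv q →
    (PySem.List.pyRange (pre.length : Int) ((pre.length + 2 + t.length + 1 : Nat) : Int) 1).foldl
        pvCapSentStep (pre ++ pv :: qv :: t.map (fun c => [c]) ++ [[]])
      = pre ++ pv :: qv :: (pvGoA p q t).map (fun c => [c]) ++ [[]] := by
  intro t
  induction t with
  | nil =>
    intro pre pv qv p q hm hpv hqv
    have hlen : ((pre ++ pv :: qv :: [].map (fun c => [c]) ++ [[]]).length : Int)
        = (pre.length : Int) + 3 := by simp; try omega
    rw [PySem.List.pyRange_one_cons (by simp; try omega)]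
    rw [PySem.List.pyRange_one_cons (by simp; try omega)]
    rw [PySem.List.pyRange_one_cons (by simp; try omega)]
    rw [PySem.List.pyRange_one_eq_nil (by simp; try omega)]
    simp only [List.foldl_cons, List.foldl_nil]
    have step1 : pvCapSentStep (pre ++ pv :: qv :: [].map (fun c => [c]) ++ [[]])
        (pre.length : Int) = pre ++ pv :: qv :: [].map (fun c => [c]) ++ [[]] := by
      rw [pvCapSentStep, if_neg (by omega)]
      split
      · next hcond =>
        have h2 : ((pre.length : Int) + 2).toNat = (pre ++ [pv, qv]).length := by simp; omega
        have hassoc : pre ++ pv :: qv :: [].map (fun c : Char => [c]) ++ [[]]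
            = (pre ++ [pv, qv]) ++ ([] : List Char) :: [] := by simp
        have hget : PySem.List.pyGetD (pre ++ pv :: qv :: [].map (fun c : Char => [c]) ++ [[]])
            ((pre.length : Int) + 2) [] = [] := by
          rw [hassoc]
          have : ((pre.length : Int) + 2) = (((pre ++ [pv, qv]).length : Nat) : Int) := by
            simp; try omega
          rw [this, pvGetD_mid]
        rw [hget, h2, hassoc, pvSet_mid]
        simp [PySem.Chars.upper]
      · rfl
    rw [step1]
    have step2 : pvCapSentStep (pre ++ pv :: qv :: [].map (fun c => [c]) ++ [[]])
        ((pre.length : Int) + 1) = pre ++ pv :: qv :: [].map (fun c => [c]) ++ [[]] := by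
      rw [pvCapSentStep, if_neg (by omega)]
      rw [if_neg (by rw [hlen]; rintro ⟨h1, -⟩; omega)]
    rw [step2]
    have step3 : pvCapSentStep (pre ++ pv :: qv :: [].map (fun c => [c]) ++ [[]])
        ((pre.length : Int) + 1 + 1) = pre ++ pv :: qv :: [].map (fun c => [c]) ++ [[]] := by
      rw [pvCapSentStep, if_neg (by omega)]
      rw [if_neg (by rw [hlen]; rintro ⟨h1, -⟩; omega)]
    rw [step3, pvGoA]
  | cons c w ih =>
    intro pre pv qv p q hm hpv hqv
    rw [PySem.List.pyRange_one_cons (by simp; try omega)]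
    simp only [List.foldl_cons]
    have hget0 : PySem.List.pyGetD (pre ++ pv :: qv :: (c :: w).map (fun c => [c]) ++ [[]])
        (pre.length : Int) [] = pv := by
      have hassoc : pre ++ pv :: qv :: (c :: w).map (fun c : Char => [c]) ++ [[]]
          = pre ++ pv :: (qv :: (c :: w).map (fun c : Char => [c]) ++ [[]]) := by simp
      rw [hassoc, pvGetD_mid]
    have hget1 : PySem.List.pyGetD (pre ++ pv :: qv :: (c :: w).map (fun c => [c]) ++ [[]])
        ((pre.length : Int) + 1) [] = qv := by
      have hassoc : pre ++ pv :: qv :: (c :: w).map (fun c : Char => [c]) ++ [[]]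
          = (pre ++ [pv]) ++ qv :: ((c :: w).map (fun c : Char => [c]) ++ [[]]) := by simp
      have hc : ((pre.length : Int) + 1) = (((pre ++ [pv]).length : Nat) : Int) := by simp
      rw [hassoc, hc, pvGetD_mid]
    have hget2 : PySem.List.pyGetD (pre ++ pv :: qv :: (c :: w).map (fun c => [c]) ++ [[]])
        ((pre.length : Int) + 2) [] = [c] := by
      have hassoc : pre ++ pv :: qv :: (c :: w).map (fun c : Char => [c]) ++ [[]]
          = (pre ++ [pv, qv]) ++ [c] :: (w.map (fun c : Char => [c]) ++ [[]]) := by simp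
      have hc : ((pre.length : Int) + 2) = (((pre ++ [pv, qv]).length : Nat) : Int) := by
        simp; try omega
      rw [hassoc, hc, pvGetD_mid]
    have hstep : pvCapSentStep (pre ++ pv :: qv :: (c :: w).map (fun c => [c]) ++ [[]])
        (pre.length : Int)
        = pre ++ pv :: qv :: ([if pvPunctC p && (q == ' ') then PySem.Chars.upperChar c else c]
            :: w.map (fun c => [c])) ++ [[]] := by
      rw [pvCapSentStep, if_neg (by omega)]
      by_cases hcond : (pvPunctC p && (q == ' ')) = true
      · rw [if_pos]
        · rw [hget2]
          have h2 : ((pre.length : Int) + 2).toNat = (pre ++ [pv, qv]).length := by simp; omega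
          have hassoc : pre ++ pv :: qv :: (c :: w).map (fun c : Char => [c]) ++ [[]]
              = (pre ++ [pv, qv]) ++ [c] :: (w.map (fun c : Char => [c]) ++ [[]]) := by simp
          rw [h2, hassoc, pvSet_mid, hcond]
          simp [PySem.Chars.upper]
        · refine ⟨by simp; push_cast; omega, ?_, ?_⟩
          · rw [hget0]
            simp only [pvPunctC, Bool.or_eq_true, beq_iff_eq, Bool.and_eq_true] at hcond
            rcases hcond.1 with (h | h) | h
            · exact Or.inl (hpv.1.mpr h)
            · exact Or.inr (Or.inl (hpv.2.1.mpr h))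
            · exact Or.inr (Or.inr (hpv.2.2.1.mpr h))
          · rw [hget1]
            simp only [pvPunctC, Bool.and_eq_true, beq_iff_eq] at hcond
            exact hqv.2.2.2.mpr hcond.2
      · have hcf : (pvPunctC p && (q == ' ')) = false := by simpa using hcond
        rw [if_neg, hcf]
        · simp
        · rintro ⟨-, hpunct, hspace⟩
          rw [hget0] at hpunct
          rw [hget1] at hspace
          apply hcond
          simp only [pvPunctC, Bool.and_eq_true, Bool.or_eq_true, beq_iff_eq]
          refine ⟨?_, hqv.2.2.2.mp hspace⟩
          rcases hpunct with h | h | h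
          · exact Or.inl (Or.inl (hpv.1.mp h))
          · exact Or.inl (Or.inr (hpv.2.1.mp h))
          · exact Or.inr (hpv.2.2.1.mp h)
    rw [hstep]
    have hre : pre ++ pv :: qv :: ([if pvPunctC p && (q == ' ') then PySem.Chars.upperChar c else c]
          :: w.map (fun c => [c])) ++ [[]]
        = (pre ++ [pv]) ++ qv
            :: [if pvPunctC p && (q == ' ') then PySem.Chars.upperChar c else c]
            :: w.map (fun c => [c]) ++ [[]] := by
      split <;> simp
    have hrange : PySem.List.pyRange ((pre.length : Int) + 1)
          ((pre.length + 2 + (c :: w).length + 1 : Nat) : Int) 1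
        = PySem.List.pyRange (((pre ++ [pv]).length : Nat) : Int)
          (((pre ++ [pv]).length + 2 + w.length + 1 : Nat) : Int) 1 := by
      congr 1 <;> push_cast <;> simp <;> omega
    rw [hre, hrange]
    have hreprC : pvRepr [if pvPunctC p && (q == ' ') then PySem.Chars.upperChar c else c] c := by
      split
      · exact pvRepr_upper c
      · exact pvRepr_self c
    rw [ih (pre ++ [pv]) qv _ q c (by simp) hqv hreprC]
    rw [pvGoA]
    split <;> simp

-- the full capitalize_sentences equals the closed char recursion
theorem pvCapSentences_eq (s : List Char) : pvCapSentences s = pvCapC s := by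
  rw [pvCapSentences]
  simp only [PySem.List.foldl_append_singleton_eq_map, List.nil_append]
  match s with
  | [] =>
    rw [PySem.List.pyRange_one_cons (by simp)]
    rw [PySem.List.pyRange_one_eq_nil (by simp)]
    simp [pvCapSentStep, PySem.List.pyGetD_natCast, PySem.Chars.upper, pvCapC,
      PySem.Chars.join_singleton]
  | [c] =>
    rw [PySem.List.pyRange_one_cons (by simp)]
    rw [PySem.List.pyRange_one_cons (by simp)]
    rw [PySem.List.pyRange_one_eq_nil (by simp)]
    simp only [List.foldl_cons, List.foldl_nil]
    have h0 : pvCapSentStep ([c].map (fun c => [c]) ++ [[]]) 0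
        = [[PySem.Chars.upperChar c]] ++ [[]] := by
      rw [pvCapSentStep, if_pos rfl]
      simp [PySem.List.pyGetD_natCast, PySem.Chars.upper]
    rw [h0]
    have h1 : pvCapSentStep ([[PySem.Chars.upperChar c]] ++ [[]]) ((0 : Int) + 1)
        = [[PySem.Chars.upperChar c]] ++ [[]] := by
      rw [pvCapSentStep, if_neg (by omega), if_neg (by rintro ⟨h, -⟩; simp at h; try omega)]
    rw [h1]
    rw [pvJoinNil]
    simp [pvCapC, pvCapC1]
  | [c, d] =>
    rw [PySem.List.pyRange_one_cons (by simp)]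
    rw [PySem.List.pyRange_one_cons (by simp)]
    rw [PySem.List.pyRange_one_cons (by simp)]
    rw [PySem.List.pyRange_one_eq_nil (by simp)]
    simp only [List.foldl_cons, List.foldl_nil]
    have h0 : pvCapSentStep ([c, d].map (fun c => [c]) ++ [[]]) 0
        = [[PySem.Chars.upperChar c], [d]] ++ [[]] := by
      rw [pvCapSentStep, if_pos rfl]
      simp [PySem.List.pyGetD_natCast, PySem.Chars.upper]
    rw [h0]
    have h1 : pvCapSentStep ([[PySem.Chars.upperChar c], [d]] ++ [[]]) ((0 : Int) + 1)
        = [[PySem.Chars.upperChar c], [d]] ++ [[]] := by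
      rw [pvCapSentStep, if_neg (by omega), if_neg (by rintro ⟨h, -⟩; simp at h; try omega)]
    rw [h1]
    have h2 : pvCapSentStep ([[PySem.Chars.upperChar c], [d]] ++ [[]]) ((0 : Int) + 1 + 1)
        = [[PySem.Chars.upperChar c], [d]] ++ [[]] := by
      rw [pvCapSentStep, if_neg (by omega), if_neg (by rintro ⟨h, -⟩; simp at h; try omega)]
    rw [h2]
    rw [pvJoinNil]
    simp [pvCapC, pvCapC1, pvCapC2]
  | c :: d :: e :: t =>
    rw [PySem.List.pyRange_one_cons (by simp; omega)]
    simp only [List.foldl_cons]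
    have h0 : pvCapSentStep ((c :: d :: e :: t).map (fun c => [c]) ++ [[]]) 0
        = [[PySem.Chars.upperChar c]] ++ [d] :: [e] :: t.map (fun c => [c]) ++ [[]] := by
      rw [pvCapSentStep, if_pos rfl]
      simp [PySem.List.pyGetD_natCast, PySem.Chars.upper]
    rw [h0]
    have hrange : PySem.List.pyRange ((0 : Int) + 1)
          ((((c :: d :: e :: t).map (fun c : Char => [c]) ++ [[]]).length : Nat) : Int) 1
        = PySem.List.pyRange ((([[PySem.Chars.upperChar c]] : List (List Char)).length : Nat) : Int)
          ((([[PySem.Chars.upperChar c]] : List (List Char)).length + 2 + t.length + 1 : Nat) : Int)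
          1 := by
      congr 1 <;> push_cast <;> simp <;> omega
    rw [hrange]
    rw [pvLoopW t [[PySem.Chars.upperChar c]] [d] [e] d e (by simp) (pvRepr_self d)
      (pvRepr_self e)]
    rw [pvJoinNil]
    simp [pvCapC, pvCapC1, pvCapC2]
    rw [← pvJoinNil, PySem.Chars.join_nil_singletons]

-- ---------- regrouping ----------

def pvRegroup (l : List String) (g : List (List String)) (acc : List (List String)) (c : Int) :
    List (List String) :=
  (g.foldl
    (fun (st : List (List String) × Int) x =>
      (st.1 ++ [PySem.List.slice l (some st.2) (some (st.2 + (x.length : Int)))],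
        st.2 + (x.length : Int)))
    (acc, c)).1

theorem pvSlice_nat (l : List String) (c k : Nat) :
    PySem.List.slice l (some (c : Int)) (some ((c : Int) + (k : Int)))
      = (l.drop c).take k := by
  have hck : ((c : Int) + (k : Int)) = ((c + k : Nat) : Int) := by push_cast; ring
  rw [hck, PySem.List.slice_toNat l (by positivity) (by positivity)]
  simp only [Int.toNat_natCast]
  congr 1
  omega

theorem pvSlice_take_eq (l1 l2 : List String) (c k : Nat)
    (h : l1.take (c + k) = l2.take (c + k)) :
    PySem.List.slice l1 (some (c : Int)) (some ((c : Int) + (k : Int)))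
      = PySem.List.slice l2 (some (c : Int)) (some ((c : Int) + (k : Int))) := by
  rw [pvSlice_nat, pvSlice_nat]
  have h2 := congrArg (List.drop c) h
  rw [List.drop_take, List.drop_take] at h2
  simpa using h2

theorem pvRegroup_take_eq : ∀ (g : List (List String)) (l1 l2 : List String)
    (acc : List (List String)) (c : Nat),
    l1.take (c + (g.map List.length).sum) = l2.take (c + (g.map List.length).sum) →
    pvRegroup l1 g acc (c : Int) = pvRegroup l2 g acc (c : Int) := by
  intro g
  induction g with
  | nil => intro l1 l2 acc c _; rfl
  | cons x g' ih =>
    intro l1 l2 acc c h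
    have hx : l1.take (c + x.length) = l2.take (c + x.length) := by
      have hle : c + x.length ≤ c + (((x :: g').map List.length).sum) := by
        have hxx : x.length ≤ ((x :: g').map List.length).sum := by
          rw [List.map_cons, List.sum_cons]; omega
        omega
      have h' := congrArg (List.take (c + x.length)) h
      simpa [List.take_take, Nat.min_eq_left hle] using h'
    rw [pvRegroup, List.foldl_cons, pvRegroup, List.foldl_cons]
    have hsl := pvSlice_take_eq l1 l2 c x.length hx
    rw [hsl]
    have hc : ((c : Int) + (x.length : Int)) = ((c + x.length : Nat) : Int) := by push_cast; ring
    have h2 : l1.take ((c + x.length) + (g'.map List.length).sum)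
        = l2.take ((c + x.length) + (g'.map List.length).sum) := by
      have : (c + x.length) + (g'.map List.length).sum
          = c + ((x :: g').map List.length).sum := by
        simp only [List.map_cons, List.sum_cons]; omega
      rw [this]; exact h
    have := ih l1 l2
      (acc ++ [PySem.List.slice l2 (some (c : Int)) (some ((c : Int) + (x.length : Int)))])
      (c + x.length) h2
    rw [pvRegroup, pvRegroup] at this
    rw [hc]
    exact this

-- ---------- token-level equality ----------

theorem pvTokens_eq (s : List Char)
    (hpat : ¬ ((s.getD 0 'x' = '.' ∨ s.getD 0 'x' = '!' ∨ s.getD 0 'x' = '?') ∧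
      s.getD 1 'x' = ' ' ∧
      PySem.Chars.upperChar (s.getD 2 ' ') ≠ s.getD 2 ' ')) :
    pvSplit [] (pvCapC s) = pvScanTok true (pvSplit [] s) := by
  have hsf : ∀ t ∈ pvSplit [] s, ' ' ∉ t := pvSplit_space_free s [] (by simp)
  have hj : PySem.Chars.join [' '] (pvSplit [] s) = s := by
    simpa using pvJoin_pvSplit s []
  have hquirk : ∀ c0 t1 rest, pvSplit [] s = [c0] :: t1 :: rest → pvPunctC c0 = true →
      (∀ e es, t1 = e :: es → PySem.Chars.upperChar e = e) := by
    intro c0 t1 rest hts hp e es ht1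
    subst ht1
    by_contra hne
    apply hpat
    have hseq : s = PySem.Chars.join [' '] ([c0] :: (e :: es) :: rest) :=
      hj.symm.trans (congrArg (PySem.Chars.join [' ']) hts)
    rw [PySem.Chars.join_cons_cons] at hseq
    have hshape : ∃ X, s = c0 :: ' ' :: e :: X := by
      match rest with
      | [] =>
        rw [PySem.Chars.join_singleton] at hseq
        exact ⟨es, by simpa using hseq⟩
      | u :: rest' =>
        rw [PySem.Chars.join_cons_cons] at hseq
        exact ⟨es ++ ' ' :: PySem.Chars.join [' '] (u :: rest'), by simpa using hseq⟩
    obtain ⟨X, hX⟩ := hshape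
    subst hX
    simp only [pvPunctC, Bool.or_eq_true, beq_iff_eq] at hp
    refine ⟨?_, by simp [List.getD], by simpa [List.getD] using hne⟩
    simp only [List.getD]
    rcases hp with (h | h) | h
    · exact Or.inl (by simp [h])
    · exact Or.inr (Or.inl (by simp [h]))
    · exact Or.inr (Or.inr (by simp [h]))
  conv_lhs => rw [← hj]
  rw [pvCapC_join _ hsf hquirk]
  have hsf2 := pvScan_space_free (pvSplit [] s) true hsf
  have hnn : pvScanTok true (pvSplit [] s) ≠ [] := by
    match hts0 : pvSplit [] s with
    | [] => exact absurd hts0 (pvSplit_ne_nil s [])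
    | t :: ts' => exact pvScan_ne_nil true t ts'
  exact pvSplit_join _ hnn hsf2

-- take-1 agreement in the quirk case
theorem pvTokens_take1 (c0 : Char) (rest : List Char)
    (hc0 : PySem.Chars.upperChar c0 = c0) (hcs : c0 ≠ ' ') (W : Nat) (hW : W ≤ 1) :
    (pvSplit [] (pvCapC (c0 :: ' ' :: rest))).take W
      = (pvScanTok true (pvSplit [] (c0 :: ' ' :: rest))).take W := by
  match W, hW with
  | 0, _ => simp
  | 1, _ =>
    rw [pvCapC, pvCapC1]
    rw [pvSplit, if_neg (by simpa [hc0] using hcs)]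
    rw [pvSplit, if_pos rfl]
    rw [pvSplit, if_neg hcs]
    rw [pvSplit, if_pos rfl]
    rw [pvScanTok, if_pos (by simp)]
    simp [pvUpperFirst, hc0]

-- the grid text seen by the ports, row by row
theorem pvHolder_flatten (g : List (List String)) :
    g.foldl (fun h x => h ++ PySem.Chars.join [' '] (x.map String.toList) ++ [' ']) []
      = (g.map (fun x => PySem.Chars.join [' '] (x.map String.toList) ++ [' '])).flatten := by
  have hfe : (fun (h : List Char) (x : List String) =>
        h ++ PySem.Chars.join [' '] (x.map String.toList) ++ [' '])
      = fun (h : List Char) (x : List String) =>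
        h ++ (PySem.Chars.join [' '] (x.map String.toList) ++ [' ']) := by
    funext h x; simp
  rw [hfe, PySem.List.foldl_append_eq_flatMap]
  simp [List.flatMap_def]

theorem pvRow_join : ∀ (x : List String),
    PySem.Chars.join [' '] (x.map String.toList) ++ [' '] = pvRowChars x := by
  intro x
  match x with
  | [] => simp [PySem.Chars.join_nil, pvRowChars]
  | w :: rest =>
    rw [pvRowChars, if_neg (by simp)]
    induction rest generalizing w with
    | nil => simp [PySem.Chars.join_singleton]
    | cons u rest' ih =>
      rw [List.map_cons, pvJoin_cons _ _ _ (by simp), List.flatMap_cons, ← ih u]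
      simp

theorem pvHolder_rowChars (g : List (List String)) :
    g.foldl (fun h x => h ++ PySem.Chars.join [' '] (x.map String.toList) ++ [' ']) []
      = g.flatMap pvRowChars := by
  rw [pvHolder_flatten]
  have : (fun (x : List String) => PySem.Chars.join [' '] (x.map String.toList) ++ [' '])
      = pvRowChars := funext pvRow_join
  rw [this, List.flatMap_def]

-- stripping = dropping leading spaces, then some all-space tail
theorem pvStrip_decomp (l : List Char) :
    ∃ r, l.dropWhile (fun c => [' '].contains c)
        = PySem.Chars.stripChars l [' '] ++ r ∧ ∀ c ∈ r, c = ' ' := by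
  rw [PySem.Chars.stripChars]
  set t := l.dropWhile (fun c => [' '].contains c) with ht
  refine ⟨(t.reverse.takeWhile (fun c => [' '].contains c)).reverse, ?_, ?_⟩
  · calc t = t.reverse.reverse := (List.reverse_reverse t).symm
      _ = (t.reverse.takeWhile (fun c => [' '].contains c)
            ++ t.reverse.dropWhile (fun c => [' '].contains c)).reverse := by
          rw [List.takeWhile_append_dropWhile]
      _ = (t.reverse.dropWhile (fun c => [' '].contains c)).reverse
            ++ (t.reverse.takeWhile (fun c => [' '].contains c)).reverse := by
          rw [List.reverse_append]
  · intro c hc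
    rw [List.mem_reverse] at hc
    have := List.mem_takeWhile_imp hc
    simpa using this

theorem pvGetD_space (r : List Char) (hr : ∀ c ∈ r, c = ' ') (i : Nat) :
    r.getD i ' ' = ' ' := by
  rcases h : r[i]? with _ | c
  · simp [List.getD, h]
  · simp only [List.getD, h, Option.getD_some]
    exact hr c (List.mem_of_getElem? h)

-- the change-region pattern reads the same before and after right-stripping
theorem pvPat_iff (s r : List Char) (hr : ∀ c ∈ r, c = ' ') :
    (((s ++ r).getD 1 'x' = ' ') ∧
      ((s ++ r).getD 0 'x' = '.' ∨ (s ++ r).getD 0 'x' = '!' ∨ (s ++ r).getD 0 'x' = '?') ∧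
      PySem.Chars.upperChar ((s ++ r).getD 2 ' ') ≠ (s ++ r).getD 2 ' ')
    ↔ ((s.getD 1 'x' = ' ') ∧
      (s.getD 0 'x' = '.' ∨ s.getD 0 'x' = '!' ∨ s.getD 0 'x' = '?') ∧
      PySem.Chars.upperChar (s.getD 2 ' ') ≠ s.getD 2 ' ') := by
  match s with
  | [] =>
    constructor
    · rintro ⟨-, -, h3⟩
      exfalso; apply h3
      have h2 : (([] : List Char) ++ r).getD 2 ' ' = ' ' := by
        rw [List.nil_append]; exact pvGetD_space r hr 2
      rw [h2]; decide
    · rintro ⟨-, -, h3⟩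
      exfalso; apply h3
      have h2 : ([] : List Char).getD 2 ' ' = ' ' := by simp
      rw [h2]; decide
  | [a] =>
    constructor
    · rintro ⟨-, -, h3⟩
      exfalso; apply h3
      have h2 : ([a] ++ r).getD 2 ' ' = r.getD 1 ' ' := by simp [List.getD]
      rw [h2, pvGetD_space r hr 1]; decide
    · rintro ⟨-, -, h3⟩
      exfalso; apply h3
      have h2 : ([a] : List Char).getD 2 ' ' = ' ' := by simp [List.getD]
      rw [h2]; decide
  | [a, b] =>
    constructor
    · rintro ⟨-, -, h3⟩
      exfalso; apply h3
      have h2 : ([a, b] ++ r).getD 2 ' ' = r.getD 0 ' ' := by simp [List.getD]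
      rw [h2, pvGetD_space r hr 0]; decide
    · rintro ⟨-, -, h3⟩
      exfalso; apply h3
      have h2 : ([a, b] : List Char).getD 2 ' ' = ' ' := by simp [List.getD]
      rw [h2]; decide
  | a :: b :: c :: t =>
    have e0 : (a :: b :: c :: t ++ r).getD 0 'x' = a := by simp
    have e1 : (a :: b :: c :: t ++ r).getD 1 'x' = b := by simp
    have e2 : (a :: b :: c :: t ++ r).getD 2 ' ' = c := by simp
    rw [List.cons_append, List.cons_append, List.cons_append] at *
    rw [e0, e1, e2]
    simp [List.getD]

theorem pv_main : ∀ (gridList : List (List String)), Dom_capitalize_sentence_grid gridList →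
    ¬ D_capitalize_sentence_grid gridList →
    capitalize_sentence_grid gridList = capitalize_sentence_grid_alt gridList := by
  intro g _ hD
  rw [capitalize_sentence_grid, capitalize_sentence_grid_alt]
  simp only [pvCapSentences_eq, pvSplitOn_eq]
  obtain ⟨r, hdec, hr⟩ := pvStrip_decomp
    (g.foldl (fun h x => h ++ PySem.Chars.join [' '] (x.map String.toList) ++ [' ']) [])
  set s : List Char := PySem.Chars.stripChars
    (g.foldl (fun h x => h ++ PySem.Chars.join [' '] (x.map String.toList) ++ [' ']) []) [' ']
    with hs
  have hlead : pvLeadChars g = s ++ r := by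
    rw [pvLeadChars, ← pvHolder_rowChars]
    have hpred : (fun (c : Char) => c == ' ') = fun c => [' '].contains c := by
      funext c; rw [Bool.eq_iff_iff]; simp
    rw [hpred, hdec]
  show pvRegroup ((pvSplit [] (pvCapC s)).map String.ofList) g [] ((0 : Nat) : Int)
      = pvRegroup ((pvScanTok true (pvSplit [] s)).map String.ofList) g [] ((0 : Nat) : Int)
  apply pvRegroup_take_eq
  by_cases hpat : ((s.getD 0 'x' = '.' ∨ s.getD 0 'x' = '!' ∨ s.getD 0 'x' = '?') ∧
      s.getD 1 'x' = ' ' ∧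
      PySem.Chars.upperChar (s.getD 2 ' ') ≠ s.getD 2 ' ')
  · -- A's x==0 quirk shape: outside D_ only because the grid has at most one word,
    -- so the regrouping reads at most the first token, on which both sides agree
    have hW : (g.map List.length).sum ≤ 1 := by
      by_contra hge
      have hcomp := (pvPat_iff s r hr).mpr ⟨hpat.2.1, hpat.1, hpat.2.2⟩
      refine hD ⟨?_, ?_, ?_, by omega⟩
      · rw [hlead]; exact hcomp.1
      · rw [hlead]; exact hcomp.2.1
      · rw [hlead]; exact hcomp.2.2
    match hs2 : s, hpat with
    | [], hpat => simp [List.getD] at hpat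
    | [a], hpat => simp [List.getD] at hpat
    | a :: b :: r', hpat =>
      have hb : b = ' ' := by simpa [List.getD] using hpat.2.1
      subst hb
      have hpa : a = '.' ∨ a = '!' ∨ a = '?' := by simpa [List.getD] using hpat.1
      have hc0 : PySem.Chars.upperChar a = a := by
        rcases hpa with h | h | h <;> subst h <;> decide
      have ha : a ≠ ' ' := by rcases hpa with h | h | h <;> subst h <;> decide
      have htok := pvTokens_take1 a r' hc0 ha (0 + (g.map List.length).sum) (by omega)
      rw [← List.map_take, ← List.map_take, htok]
  · have htok := pvTokens_eq s hpat
    rw [htok]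

-- every token the regrouping emits, in order
theorem pvRegroup_flatten : ∀ (g : List (List String)) (l : List String)
    (acc : List (List String)) (c : Nat),
    (pvRegroup l g acc (c : Int)).flatten
      = acc.flatten ++ (l.drop c).take ((g.map List.length).sum) := by
  intro g
  induction g with
  | nil => intro l acc c; simp [pvRegroup]
  | cons x g' ih =>
    intro l acc c
    have hc : ((c : Int) + (x.length : Int)) = ((c + x.length : Nat) : Int) := by push_cast; ring
    rw [pvRegroup, List.foldl_cons]
    show (pvRegroup l g' (acc ++ [PySem.List.slice l (some (c : Int))
        (some ((c : Int) + (x.length : Int)))]) ((c : Int) + (x.length : Int))).flatten = _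
    have hsl : PySem.List.slice l (some (c : Int)) (some ((c + x.length : Nat) : Int))
        = (l.drop c).take x.length := by
      rw [← hc]; exact pvSlice_nat l c x.length
    rw [hc, ih l _ (c + x.length), hsl]
    rw [List.map_cons, List.sum_cons, List.take_add, List.drop_drop]
    simp [Nat.add_comm]

theorem pvSplit_head : ∀ (l cur : List Char), ∃ u ts', pvSplit cur l = (cur ++ u) :: ts' := by
  intro l
  induction l with
  | nil => intro cur; exact ⟨[], [], by simp [pvSplit]⟩
  | cons c r ih =>
    intro cur
    by_cases hc : c = ' '
    · exact ⟨[], pvSplit [] r, by simp [pvSplit, hc]⟩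
    · obtain ⟨u, ts', hu⟩ := ih (cur ++ [c])
      exact ⟨c :: u, ts', by simp [pvSplit, hc, hu]⟩

-- ===== VERDICT (by name: the statement is the Claim_ definition above) =====
theorem capitalize_sentence_grid_spec : Claim_unchanged_capitalize_sentence_grid := by
  intro g hdom hD
  exact pv_main g hdom hD

theorem capitalize_sentence_grid_changed : Claim_changed_capitalize_sentence_grid := by
  unfold Claim_changed_capitalize_sentence_grid; decide

theorem capitalize_sentence_grid_tight : Claim_exact_capitalize_sentence_grid := by
  intro g _ hD heq
  rw [capitalize_sentence_grid, capitalize_sentence_grid_alt] at heq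
  simp only [pvCapSentences_eq, pvSplitOn_eq] at heq
  obtain ⟨r, hdec, hr⟩ := pvStrip_decomp
    (g.foldl (fun h x => h ++ PySem.Chars.join [' '] (x.map String.toList) ++ [' ']) [])
  set s : List Char := PySem.Chars.stripChars
    (g.foldl (fun h x => h ++ PySem.Chars.join [' '] (x.map String.toList) ++ [' ']) []) [' ']
    with hs
  have hlead : pvLeadChars g = s ++ r := by
    rw [pvLeadChars, ← pvHolder_rowChars]
    have hpred : (fun (c : Char) => c == ' ') = fun c => [' '].contains c := by
      funext c; rw [Bool.eq_iff_iff]; simp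
    rw [hpred, hdec]
  rw [D_capitalize_sentence_grid, hlead] at hD
  have hW : 2 ≤ (g.map List.length).sum := hD.2.2.2
  have hpat := (pvPat_iff s r hr).mp ⟨hD.1, hD.2.1, hD.2.2.1⟩
  change pvRegroup ((pvSplit [] (pvCapC s)).map String.ofList) g [] ((0 : Nat) : Int)
      = pvRegroup ((pvScanTok true (pvSplit [] s)).map String.ofList) g [] ((0 : Nat) : Int)
    at heq
  have htake := congrArg List.flatten heq
  rw [pvRegroup_flatten, pvRegroup_flatten] at htake
  simp only [List.flatten_nil, List.drop_zero, List.nil_append] at htake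
  have h1 := congrArg (fun l => l[1]?) htake
  simp only [List.getElem?_take, if_pos (by omega : 1 < (g.map List.length).sum)] at h1
  match hs2 : s, hpat with
  | [], hpat => simp [List.getD] at hpat
  | [a], hpat =>
    have h2 : ([a] : List Char).getD 2 ' ' = ' ' := by simp [List.getD]
    exact hpat.2.2 (by rw [h2]; decide)
  | [a, b], hpat =>
    have h2 : ([a, b] : List Char).getD 2 ' ' = ' ' := by simp [List.getD]
    exact hpat.2.2 (by rw [h2]; decide)
  | a :: b :: cc :: X, hpat =>
    have hb : b = ' ' := by simpa [List.getD] using hpat.1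
    subst hb
    have hpa : a = '.' ∨ a = '!' ∨ a = '?' := by simpa [List.getD] using hpat.2.1
    have hU : PySem.Chars.upperChar cc ≠ cc := by simpa [List.getD] using hpat.2.2
    have ha : a ≠ ' ' := by rcases hpa with h | h | h <;> subst h <;> decide
    have hUa : PySem.Chars.upperChar a = a := by
      rcases hpa with h | h | h <;> subst h <;> decide
    have hcc : cc ≠ ' ' := fun h => hU (by rw [h]; decide)
    obtain ⟨u, ts', hu⟩ := pvSplit_head X [cc]
    obtain ⟨u', ts'', hu'⟩ := pvSplit_head (pvGoA ' ' cc X) [cc]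
    have hEa : pvEndsPunct [a] = true := by
      rcases hpa with h | h | h <;> subst h <;> decide
    have hTA : pvSplit [] (pvCapC (a :: ' ' :: cc :: X))
        = [a] :: (cc :: u') :: ts'' := by
      rw [pvCapC, pvCapC1, pvCapC2, hUa]
      rw [pvSplit, if_neg ha, pvSplit, if_pos rfl, pvSplit, if_neg hcc]
      rw [show ([] : List Char) ++ [cc] = [cc] by simp, hu']
      simp
    have hTB : pvScanTok true (pvSplit [] (a :: ' ' :: cc :: X))
        = [a] :: (PySem.Chars.upperChar cc :: u) :: pvScanTok (pvEndsPunct (cc :: u)) ts' := by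
      rw [pvSplit, if_neg ha, pvSplit, if_pos rfl, pvSplit, if_neg hcc]
      rw [show ([] : List Char) ++ [cc] = [cc] by simp, hu]
      rw [pvScanTok, if_pos (by simp), pvScanTok, if_pos (by simp)]
      simp [pvUpperFirst, hEa, hUa]
    rw [hTA, hTB] at h1
    simp only [List.map_cons, List.getElem?_cons_succ, List.getElem?_cons_zero,
      Option.some.injEq] at h1
    have hlists := congrArg String.toList h1
    simp only [String.toList_ofList] at hlists
    injection hlists with hh _
    exact hU hh.symm
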